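-- pv_equiv track=rewrite | github.com/diegopetacchi/cdc-code | csv_metadata_utils/utils.py | get_folder_list
-- ===== SOURCE A (Python) =====
-- def get_folder_list(path):
--     source_path = path.replace("/dbfs/mnt", "").replace("dbfs:/mnt/", "")
--     file_path = "/dbfs/mnt"
--     folder_list = []
--     for folder in source_path.split("/"):
--         if folder != '':
--             file_path = file_path + "/" + folder
--             folder_list.append(file_path)
--     return folder_list
-- ===== SOURCE B (Python) =====
-- def get_folder_list(path):
--     source_path = path.replace("/dbfs/mnt", "").replace("dbfs:/mnt/", "")
--     parts = [p for p in source_path.split("/") if p != '']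
--     return ["/dbfs/mnt/" + "/".join(parts[:i + 1]) for i in range(len(parts))]
-- ===== Notes on version B (the rewrite author's own statement) =====
-- stated objective: alternative
-- what changed: Replaces the stateful accumulator loop (running file_path updated and appended per segment) with a stateless pass that filters the segments once and rebuilds each cumulative path independently by joining a prefix slice of the segment list.
import Mathlib
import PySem

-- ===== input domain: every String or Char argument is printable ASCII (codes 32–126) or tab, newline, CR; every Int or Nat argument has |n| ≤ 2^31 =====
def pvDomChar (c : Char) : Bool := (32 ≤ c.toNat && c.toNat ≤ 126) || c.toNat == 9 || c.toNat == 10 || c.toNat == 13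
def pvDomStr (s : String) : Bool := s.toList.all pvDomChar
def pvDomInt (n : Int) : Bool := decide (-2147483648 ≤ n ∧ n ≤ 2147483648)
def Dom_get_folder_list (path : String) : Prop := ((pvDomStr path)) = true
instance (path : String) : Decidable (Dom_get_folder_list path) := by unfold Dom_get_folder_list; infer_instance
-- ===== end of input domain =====

-- B rebuilds each cumulative path independently from a filtered prefix slice instead of A's running-accumulator loop (objective: alternative decomposition).

-- ===== PORT A =====
-- A's loop: running file_path, append to folder_list on each nonempty segment.
def get_folder_list (path : String) : List String :=
  let source_path := PySem.Str.replace (PySem.Str.replace path "/dbfs/mnt" "") "dbfs:/mnt/" ""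
  let r := (PySem.Chars.splitOn source_path.toList "/".toList).foldl
      (fun (st : List Char × List (List Char)) folder =>
        if folder ≠ [] then
          (st.1 ++ '/' :: folder, st.2 ++ [st.1 ++ '/' :: folder])
        else st)
      ("/dbfs/mnt".toList, [])
  r.2.map String.ofList

-- ===== PORT B =====
-- B: filter the segments once, then each output is '/dbfs/mnt/' + '/'.join(parts[:i+1]).
def get_folder_list_alt (path : String) : List String :=
  let source_path := PySem.Str.replace (PySem.Str.replace path "/dbfs/mnt" "") "dbfs:/mnt/" ""
  let parts := (PySem.Chars.splitOn source_path.toList "/".toList).filter (fun p => p ≠ [])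
  (List.range parts.length).map
    (fun i => String.ofList ("/dbfs/mnt/".toList ++ PySem.Chars.join "/".toList (parts.take (i + 1))))

-- ===== PRECONDITION & SPEC =====
def Spec_get_folder_list (path : String) (out : List String) : Prop := out = get_folder_list_alt path
instance (path : String) (out : List String) : Decidable (Spec_get_folder_list path out) := by unfold Spec_get_folder_list; infer_instance

-- ===== CLAIM (what is proved, stated in full; the proofs are below) =====
def Claim_equal_get_folder_list : Prop := ∀ (path : String), Dom_get_folder_list path → Spec_get_folder_list path (get_folder_list path)

-- ===== LEMMAS AND PROOFS =====

-- A's guarded fold over all segments equals the unguarded fold over the nonempty segments.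
theorem foldl_guard_filter (xs : List (List Char)) (st : List Char × List (List Char)) :
    xs.foldl
      (fun (st : List Char × List (List Char)) folder =>
        if folder ≠ [] then
          (st.1 ++ '/' :: folder, st.2 ++ [st.1 ++ '/' :: folder])
        else st) st
    = (xs.filter (fun p => p ≠ [])).foldl
      (fun (st : List Char × List (List Char)) folder =>
        (st.1 ++ '/' :: folder, st.2 ++ [st.1 ++ '/' :: folder])) st := by
  induction xs generalizing st with
  | nil => rfl
  | cons p rest ih =>
    rcases eq_or_ne p [] with hp | hp
    · rw [List.foldl_cons, if_neg (by simp [hp]), List.filter_cons_of_neg (by simp [hp]), ih]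
    · rw [List.foldl_cons, if_pos hp, List.filter_cons_of_pos (by simp [hp]), List.foldl_cons, ih]

-- The accumulator fold produces exactly the prefix-join list.
theorem foldl_eq_prefix_joins (parts : List (List Char)) (fp : List Char)
    (acc : List (List Char)) :
    (parts.foldl
      (fun (st : List Char × List (List Char)) folder =>
        (st.1 ++ '/' :: folder, st.2 ++ [st.1 ++ '/' :: folder])) (fp, acc)).2
    = acc ++ (List.range parts.length).map
        (fun i => fp ++ '/' :: PySem.Chars.join ['/'] (parts.take (i + 1))) := by
  induction parts generalizing fp acc with
  | nil => simp
  | cons p rest ih =>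
    simp only [List.foldl_cons, ih, List.length_cons, List.range_succ_eq_map,
      List.map_cons, List.map_map]
    rw [List.append_assoc]
    congr 1
    simp only [List.take_succ_cons, List.take_zero, PySem.Chars.join_singleton,
      List.singleton_append]
    congr 1
    apply List.map_congr_left
    intro i hi
    simp only [Function.comp_apply]
    have hlen : 0 < (rest.take (i + 1)).length := by
      simp only [List.length_take]
      have := List.mem_range.mp hi
      omega
    obtain ⟨q, tl, hq⟩ : ∃ q tl, rest.take (i + 1) = q :: tl := by
      cases h : rest.take (i + 1) with
      | nil => rw [h] at hlen; simp at hlen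
      | cons q tl => exact ⟨q, tl, rfl⟩
    rw [hq, PySem.Chars.join_cons_cons]
    simp

-- ===== VERDICT (by name: the statement is the Claim_ definition above) =====
theorem get_folder_list_spec : Claim_equal_get_folder_list := by
  intro path _
  show _ = _
  rw [get_folder_list, get_folder_list_alt, foldl_guard_filter, foldl_eq_prefix_joins]
  rw [List.nil_append, List.map_map]
  apply List.map_congr_left
  intro i _
  have h : ("/dbfs/mnt/".toList : List Char) = "/dbfs/mnt".toList ++ ['/'] := by rfl
  have h2 : ("/".toList : List Char) = ['/'] := by rfl
  simp only [Function.comp_apply, h, h2, List.append_assoc, List.singleton_append]
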